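-- pv_equiv track=rewrite | github.com/ankitjshi/data_analysis_UK_company_API | PythonProjectFinal_bb.py | prepare_age_groupings_services
-- ===== SOURCE A (Python) =====
-- def prepare_age_groupings_services(ageList):
--     age_group_dict = {'1-5': 0, '5-10': 0, '10-15': 0, '15-20': 0, '20-25': 0}
--     for age in ageList:
--         if age > 1 and age <= 5:
--             age_group_dict['1-5'] = age_group_dict.get('1-5')+1
--         elif age > 5 and age <= 10:
--             age_group_dict['5-10'] = age_group_dict.get('5-10')+1
--         elif age > 10 and age <= 15:
--             age_group_dict['10-15'] = age_group_dict.get('10-15')+1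
--         elif age > 15 and age <= 20:
--             age_group_dict['15-20'] = age_group_dict.get('15-20')+1
--         elif age > 20 and age <= 25:
--             age_group_dict['20-25'] = age_group_dict.get('20-25')+1
--     return age_group_dict
-- ===== SOURCE B (Python) =====
-- def prepare_age_groupings_services(ageList):
--     bounds = {'1-5': (1, 5), '5-10': (5, 10), '10-15': (10, 15),
--               '15-20': (15, 20), '20-25': (20, 25)}
--     return {k: sum(1 for age in ageList if lo < age <= hi)
--             for k, (lo, hi) in bounds.items()}
-- ===== Notes on version B (the rewrite author's own statement) =====
-- stated objective: simpler
-- what changed: Instead of a single pass dispatching each age through a five-way if/elif chain that mutates a counter dict, B builds the dict in one comprehension with one independent counting pass per bucket (sum of a generator over the list per range); there is no per-element branch dispatch and no dict mutation.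
import Mathlib
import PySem

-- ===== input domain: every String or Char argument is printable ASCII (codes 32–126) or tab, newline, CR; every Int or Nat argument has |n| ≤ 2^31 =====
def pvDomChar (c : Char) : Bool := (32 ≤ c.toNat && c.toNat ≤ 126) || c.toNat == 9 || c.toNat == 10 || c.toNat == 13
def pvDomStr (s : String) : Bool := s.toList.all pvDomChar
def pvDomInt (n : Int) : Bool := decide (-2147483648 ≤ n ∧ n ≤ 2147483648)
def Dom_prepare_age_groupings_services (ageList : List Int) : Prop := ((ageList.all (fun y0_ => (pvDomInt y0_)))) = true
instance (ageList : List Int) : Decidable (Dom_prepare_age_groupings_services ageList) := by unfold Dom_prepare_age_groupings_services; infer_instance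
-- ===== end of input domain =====

-- B builds the dict by one independent counting pass per bucket (a comprehension of per-range
-- sums) instead of A's single pass dispatching each element through a five-way if/elif chain
-- mutating a counter dict (objective: simpler).


-- ===== PORT A =====
-- one loop iteration of A: the if/elif chain over the dict
-- (Python's .get(k) always finds the key here, so it is .getD k 0 — exact since all five keys are present)
def pvAStep (d : PySem.Dict String Int) (age : Int) : PySem.Dict String Int :=
  if 1 < age ∧ age ≤ 5 then d.insert "1-5" (d.getD "1-5" 0 + 1)
  else if 5 < age ∧ age ≤ 10 then d.insert "5-10" (d.getD "5-10" 0 + 1)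
  else if 10 < age ∧ age ≤ 15 then d.insert "10-15" (d.getD "10-15" 0 + 1)
  else if 15 < age ∧ age ≤ 20 then d.insert "15-20" (d.getD "15-20" 0 + 1)
  else if 20 < age ∧ age ≤ 25 then d.insert "20-25" (d.getD "20-25" 0 + 1)
  else d

def prepare_age_groupings_services (ageList : List Int) : List (String × Int) :=
  (ageList.foldl pvAStep
    (PySem.Dict.ofList [("1-5", 0), ("5-10", 0), ("10-15", 0), ("15-20", 0), ("20-25", 0)])).items

-- ===== PORT B =====
-- sum(1 for age in ageList if lo < age <= hi): one counting pass over the list for one bucket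
def pvCnt (lo hi : Int) (l : List Int) : Int :=
  l.foldl (fun s a => if lo < a ∧ a ≤ hi then s + 1 else s) 0

def prepare_age_groupings_services_alt (ageList : List Int) : List (String × Int) :=
  ([("1-5", ((1:Int), (5:Int))), ("5-10", (5, 10)), ("10-15", (10, 15)),
    ("15-20", (15, 20)), ("20-25", (20, 25))]).map
    (fun kb => (kb.1, pvCnt kb.2.1 kb.2.2 ageList))

-- ===== PRECONDITION & SPEC =====
def Spec_prepare_age_groupings_services (ageList : List Int) (out : List (String × Int)) : Prop := out = prepare_age_groupings_services_alt ageList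
instance (ageList : List Int) (out : List (String × Int)) : Decidable (Spec_prepare_age_groupings_services ageList out) := by unfold Spec_prepare_age_groupings_services; infer_instance

-- ===== CLAIM (what is proved, stated in full; the proofs are below) =====
def Claim_equal_prepare_age_groupings_services : Prop := ∀ (ageList : List Int), Dom_prepare_age_groupings_services ageList → Spec_prepare_age_groupings_services ageList (prepare_age_groupings_services ageList)

-- ===== LEMMAS AND PROOFS =====

-- shifting the accumulator of B's counting fold
theorem pvCnt_shift (lo hi : Int) (l : List Int) : ∀ (c : Int),
    l.foldl (fun s a => if lo < a ∧ a ≤ hi then s + 1 else s) c = c + pvCnt lo hi l := by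
  induction l with
  | nil => intro c; simp [pvCnt]
  | cons a l ih =>
    intro c
    by_cases h : lo < a ∧ a ≤ hi
    · simp only [pvCnt, List.foldl_cons, if_pos h]
      rw [ih, ih]; omega
    · simp only [pvCnt, List.foldl_cons, if_neg h]
      rw [ih, ih]; omega

theorem pvCnt_cons (lo hi a : Int) (l : List Int) :
    pvCnt lo hi (a :: l) = (if lo < a ∧ a ≤ hi then 1 else 0) + pvCnt lo hi l := by
  by_cases h : lo < a ∧ a ≤ hi
  · simp only [pvCnt, List.foldl_cons, if_pos h, zero_add]
    exact pvCnt_shift lo hi l 1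
  · simp only [pvCnt, List.foldl_cons, if_neg h, zero_add]

-- the loop invariant: A's dict state ends as each start counter plus B's per-range count of the rest
theorem pv_inv (l : List Int) : ∀ (c0 c1 c2 c3 c4 : Int),
    (l.foldl pvAStep (PySem.Dict.mk [("1-5", c0), ("5-10", c1), ("10-15", c2), ("15-20", c3), ("20-25", c4)])).items
      = [("1-5", c0 + pvCnt 1 5 l), ("5-10", c1 + pvCnt 5 10 l), ("10-15", c2 + pvCnt 10 15 l),
         ("15-20", c3 + pvCnt 15 20 l), ("20-25", c4 + pvCnt 20 25 l)] := by
  induction l with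
  | nil => intro c0 c1 c2 c3 c4; simp [pvCnt]
  | cons a l ih =>
    intro c0 c1 c2 c3 c4
    simp only [List.foldl_cons]
    have e1 := pvCnt_cons 1 5 a l
    have e2 := pvCnt_cons 5 10 a l
    have e3 := pvCnt_cons 10 15 a l
    have e4 := pvCnt_cons 15 20 a l
    have e5 := pvCnt_cons 20 25 a l
    by_cases h1 : 1 < a ∧ a ≤ 5
    · have hA : pvAStep (PySem.Dict.mk [("1-5", c0), ("5-10", c1), ("10-15", c2), ("15-20", c3), ("20-25", c4)]) a
          = PySem.Dict.mk [("1-5", c0 + 1), ("5-10", c1), ("10-15", c2), ("15-20", c3), ("20-25", c4)] := by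
        simp [pvAStep, h1, PySem.Dict.insert, PySem.Dict.getD, PySem.Dict.get?, PySem.Dict.contains]
      rw [hA, ih]
      rw [if_pos h1] at e1
      rw [if_neg (by omega)] at e2; rw [if_neg (by omega)] at e3
      rw [if_neg (by omega)] at e4; rw [if_neg (by omega)] at e5
      simp only [e1, e2, e3, e4, e5]; norm_num [add_comm, add_left_comm, add_assoc]
    · by_cases h2 : 5 < a ∧ a ≤ 10
      · have hA : pvAStep (PySem.Dict.mk [("1-5", c0), ("5-10", c1), ("10-15", c2), ("15-20", c3), ("20-25", c4)]) a
            = PySem.Dict.mk [("1-5", c0), ("5-10", c1 + 1), ("10-15", c2), ("15-20", c3), ("20-25", c4)] := by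
          simp [pvAStep, h1, h2, PySem.Dict.insert, PySem.Dict.getD, PySem.Dict.get?, PySem.Dict.contains]
        rw [hA, ih]
        rw [if_neg (by omega)] at e1; rw [if_pos h2] at e2
        rw [if_neg (by omega)] at e3; rw [if_neg (by omega)] at e4; rw [if_neg (by omega)] at e5
        simp only [e1, e2, e3, e4, e5]; norm_num [add_comm, add_left_comm, add_assoc]
      · by_cases h3 : 10 < a ∧ a ≤ 15
        · have hA : pvAStep (PySem.Dict.mk [("1-5", c0), ("5-10", c1), ("10-15", c2), ("15-20", c3), ("20-25", c4)]) a
              = PySem.Dict.mk [("1-5", c0), ("5-10", c1), ("10-15", c2 + 1), ("15-20", c3), ("20-25", c4)] := by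
            simp [pvAStep, h1, h2, h3, PySem.Dict.insert, PySem.Dict.getD, PySem.Dict.get?, PySem.Dict.contains]
          rw [hA, ih]
          rw [if_neg (by omega)] at e1; rw [if_neg (by omega)] at e2
          rw [if_pos h3] at e3
          rw [if_neg (by omega)] at e4; rw [if_neg (by omega)] at e5
          simp only [e1, e2, e3, e4, e5]; norm_num [add_comm, add_left_comm, add_assoc]
        · by_cases h4 : 15 < a ∧ a ≤ 20
          · have hA : pvAStep (PySem.Dict.mk [("1-5", c0), ("5-10", c1), ("10-15", c2), ("15-20", c3), ("20-25", c4)]) a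
                = PySem.Dict.mk [("1-5", c0), ("5-10", c1), ("10-15", c2), ("15-20", c3 + 1), ("20-25", c4)] := by
              simp [pvAStep, h1, h2, h3, h4, PySem.Dict.insert, PySem.Dict.getD, PySem.Dict.get?, PySem.Dict.contains]
            rw [hA, ih]
            rw [if_neg (by omega)] at e1; rw [if_neg (by omega)] at e2
            rw [if_neg (by omega)] at e3; rw [if_pos h4] at e4; rw [if_neg (by omega)] at e5
            simp only [e1, e2, e3, e4, e5]; norm_num [add_comm, add_left_comm, add_assoc]
          · by_cases h5 : 20 < a ∧ a ≤ 25
            · have hA : pvAStep (PySem.Dict.mk [("1-5", c0), ("5-10", c1), ("10-15", c2), ("15-20", c3), ("20-25", c4)]) a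
                  = PySem.Dict.mk [("1-5", c0), ("5-10", c1), ("10-15", c2), ("15-20", c3), ("20-25", c4 + 1)] := by
                simp [pvAStep, h1, h2, h3, h4, h5, PySem.Dict.insert, PySem.Dict.getD, PySem.Dict.get?, PySem.Dict.contains]
              rw [hA, ih]
              rw [if_neg (by omega)] at e1; rw [if_neg (by omega)] at e2
              rw [if_neg (by omega)] at e3; rw [if_neg (by omega)] at e4; rw [if_pos h5] at e5
              simp only [e1, e2, e3, e4, e5]; norm_num [add_comm, add_left_comm, add_assoc]
            · have hA : pvAStep (PySem.Dict.mk [("1-5", c0), ("5-10", c1), ("10-15", c2), ("15-20", c3), ("20-25", c4)]) a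
                  = PySem.Dict.mk [("1-5", c0), ("5-10", c1), ("10-15", c2), ("15-20", c3), ("20-25", c4)] := by
                simp [pvAStep, h1, h2, h3, h4, h5]
              rw [hA, ih]
              rw [if_neg (by omega)] at e1; rw [if_neg (by omega)] at e2
              rw [if_neg (by omega)] at e3; rw [if_neg (by omega)] at e4; rw [if_neg (by omega)] at e5
              simp only [e1, e2, e3, e4, e5]; norm_num

-- ===== VERDICT (by name: the statement is the Claim_ definition above) =====
theorem prepare_age_groupings_services_spec : Claim_equal_prepare_age_groupings_services := by
  intro ageList _
  unfold Spec_prepare_age_groupings_services prepare_age_groupings_services prepare_age_groupings_services_alt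
  rw [show PySem.Dict.ofList [("1-5", (0:Int)), ("5-10", 0), ("10-15", 0), ("15-20", 0), ("20-25", 0)]
      = PySem.Dict.mk [("1-5", 0), ("5-10", 0), ("10-15", 0), ("15-20", 0), ("20-25", 0)] from by decide]
  rw [pv_inv ageList 0 0 0 0 0]
  simp [List.map]
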